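-- pv_equiv track=rewrite | github.com/thnbih/DACN-Data | makeToken.py | tokenize_keyword
-- ===== SOURCE A (Python) =====
-- def tokenize_keyword(text):
--     tokens = []
--     i = 0
--     token = ""
--     while i < len(text):
--         if text[i] in ['/', '_']:
--             if token:
--                 tokens.append(token)
--                 token = ""
--             tokens.append(text[i])
--         else:
--             token += text[i]
--         i += 1
--     if token:
--         tokens.append(token)
--     return tokens
-- ===== SOURCE B (Python) =====
-- import re
--
-- def tokenize_keyword(text):
--     return [p for p in re.split(r'([/_])', text) if p]
-- ===== Notes on version B (the rewrite author's own statement) =====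
-- stated objective: idiomatic
-- what changed: Replaces the manual index loop with a character-by-character string-concatenation accumulator by a single re.split with a capturing delimiter group followed by a filter dropping empty parts.
import Mathlib
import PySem

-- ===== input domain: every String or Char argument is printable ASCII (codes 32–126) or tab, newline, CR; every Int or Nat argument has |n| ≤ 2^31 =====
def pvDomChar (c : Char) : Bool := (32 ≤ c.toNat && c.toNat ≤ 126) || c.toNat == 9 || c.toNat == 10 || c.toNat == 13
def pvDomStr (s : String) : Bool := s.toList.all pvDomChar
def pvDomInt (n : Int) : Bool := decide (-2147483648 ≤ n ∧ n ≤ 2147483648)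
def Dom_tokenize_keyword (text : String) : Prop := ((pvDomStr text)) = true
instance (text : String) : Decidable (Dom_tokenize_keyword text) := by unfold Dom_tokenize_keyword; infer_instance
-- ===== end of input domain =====

-- B replaces A's index loop and accumulator by one regex split keeping delimiters plus a filter (idiomatic).
-- ===== PORT A =====
-- A's while loop over indices, with the running token and tokens accumulator.
def tokenizeLoopA : List Char → List String → String → List String
  | [], tokens, token => if token ≠ "" then tokens ++ [token] else tokens
  | c :: rest, tokens, token =>
    if c = '/' ∨ c = '_' then
      tokenizeLoopA rest ((if token ≠ "" then tokens ++ [token] else tokens) ++ [String.ofList [c]]) ""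
    else
      tokenizeLoopA rest tokens (token.push c)

def tokenize_keyword (text : String) : List String :=
  tokenizeLoopA text.toList [] ""

-- ===== PORT B =====
-- re.split(r'([/_])', text): the parts between delimiters (possibly empty) interleaved with the delimiters.
def reSplitDelims : List Char → List String
  | [] => [""]
  | c :: rest =>
    if c = '/' ∨ c = '_' then
      "" :: String.ofList [c] :: reSplitDelims rest
    else
      match reSplitDelims rest with
      | p :: ps => (String.ofList [c] ++ p) :: ps
      | [] => [String.ofList [c]]

def tokenize_keyword_alt (text : String) : List String :=
  (reSplitDelims text.toList).filter (fun p => p ≠ "")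

-- ===== PRECONDITION & SPEC =====
def Spec_tokenize_keyword (text : String) (out : List String) : Prop := out = tokenize_keyword_alt text
instance (text : String) (out : List String) : Decidable (Spec_tokenize_keyword text out) := by unfold Spec_tokenize_keyword; infer_instance

-- ===== CLAIM (what is proved, stated in full; the proofs are below) =====
def Claim_equal_tokenize_keyword : Prop := ∀ (text : String), Dom_tokenize_keyword text → Spec_tokenize_keyword text (tokenize_keyword text)

-- ===== LEMMAS AND PROOFS =====
theorem reSplitDelims_ne_nil (cs : List Char) : reSplitDelims cs ≠ [] := by
  cases cs with
  | nil => simp [reSplitDelims]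
  | cons c rest =>
    simp only [reSplitDelims]
    split
    · simp
    · split <;> simp

-- Loop invariant: A's loop equals tokens ++ the filtered B parts, with the pending token
-- prepended onto the first part.
theorem tokenizeLoopA_eq (cs : List Char) :
    ∀ (tokens : List String) (token : String),
    tokenizeLoopA cs tokens token =
      tokens ++ ((match reSplitDelims cs with
                  | p :: ps => (token ++ p) :: ps
                  | [] => [token]).filter (fun p => p ≠ "")) := by
  induction cs with
  | nil =>
    intro tokens token
    simp only [tokenizeLoopA, reSplitDelims]
    by_cases h : token = "" <;> simp [h]
  | cons c rest ih =>
    intro tokens token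
    simp only [tokenizeLoopA, reSplitDelims]
    by_cases hc : c = '/' ∨ c = '_'
    · simp only [hc, if_true]
      rw [ih]
      have hne := reSplitDelims_ne_nil rest
      cases hrest : reSplitDelims rest with
      | nil => exact absurd hrest hne
      | cons p ps =>
        have hd : String.ofList [c] ≠ "" := by
          cases hc with
          | inl h => subst h; decide
          | inr h => subst h; decide
        by_cases h : token = "" <;>
          simp [h, hd, List.filter, String.append_empty, List.append_assoc]
    · simp only [hc, if_false]
      rw [ih]
      have hne := reSplitDelims_ne_nil rest
      cases hrest : reSplitDelims rest with
      | nil => exact absurd hrest hne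
      | cons p ps =>
        have : token.push c ++ p = token ++ (String.ofList [c] ++ p) := by
          apply String.toList_injective
          simp
        simp [this]

-- ===== VERDICT (by name: the statement is the Claim_ definition above) =====
theorem tokenize_keyword_spec : Claim_equal_tokenize_keyword := by
  intro text _
  unfold Spec_tokenize_keyword tokenize_keyword tokenize_keyword_alt
  rw [tokenizeLoopA_eq]
  have hne := reSplitDelims_ne_nil text.toList
  cases h : reSplitDelims text.toList with
  | nil => exact absurd h hne
  | cons p ps => simp [String.empty_append]
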